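-- pv_equiv track=rewrite | github.com/queenJiJi/Algorithm_Study | nossidev/8주차/로봇만들기.py | solution
-- ===== SOURCE A (Python) =====
-- from itertools import combinations
--
-- def solution(needs,r):
--     answer = 0
--     case = len(needs[0])
--     case_col = list(combinations(range(0,case), r))
--
--     for c in case_col:
--         c=set(c)
--         count = 0
--         for need in needs:
--             for i,val in enumerate(need):
--                 if i not in c and val==1: # val이 1인데 그 val의 인덱스값이 c에 포함되지 않았다면 break
--                     break
--             else:  #만약 가장 안쪽 루프가 break에 도달하지 않으면
--                 # (즉, 모든 1이 열 조합: [1,0,0],[1,1,0],... c에 포함된 경우), count를 1 증가시킴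
--                 count+=1
--         answer = max(answer,count)
--     return answer
-- ===== SOURCE B (Python) =====
-- from itertools import combinations
--
-- def solution(needs, r):
--     # Dedup rows into a counter keyed by the tuple of 1-positions,
--     # then test each column combination against the distinct rows only.
--     case = len(needs[0])
--     counts = {}
--     for need in needs:
--         key = tuple(i for i, v in enumerate(need) if v == 1)
--         counts[key] = counts.get(key, 0) + 1
--     best = 0
--     for c in combinations(range(case), r):
--         cset = set(c)
--         covered = 0
--         for ones, cnt in counts.items():
--             if all(i in cset for i in ones):
--                 covered += cnt
--         best = max(best, covered)
--     return best
-- ===== Notes on version B (the rewrite author's own statement) =====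
-- stated objective: alternative
-- what changed: B precomputes each row's list of 1-positions once and dedups rows into a counter, then tests each column combination against the distinct rows via a subset check, instead of rescanning every row with enumerate per combination; same exact result, similar measured cost on the generated inputs.
import Mathlib
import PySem

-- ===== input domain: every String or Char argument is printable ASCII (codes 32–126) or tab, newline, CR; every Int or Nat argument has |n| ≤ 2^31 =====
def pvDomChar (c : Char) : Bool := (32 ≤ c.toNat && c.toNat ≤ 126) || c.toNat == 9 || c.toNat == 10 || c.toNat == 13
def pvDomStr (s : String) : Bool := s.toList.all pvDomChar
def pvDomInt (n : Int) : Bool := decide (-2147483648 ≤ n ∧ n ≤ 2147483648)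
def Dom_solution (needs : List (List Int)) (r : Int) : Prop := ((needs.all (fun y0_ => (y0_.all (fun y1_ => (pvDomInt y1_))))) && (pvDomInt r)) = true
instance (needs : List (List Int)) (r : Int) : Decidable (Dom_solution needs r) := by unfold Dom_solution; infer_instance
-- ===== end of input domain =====

-- B dedups the rows into a counter keyed by each row's list of 1-positions and tests each
-- column combination against the distinct rows only; return value proved equal to A's.

-- ===== PORT A =====
-- inner 'for i,val in enumerate(need): if i not in c and val==1: break / else: count+=1'
def aRowOk (c : List Int) (need : List Int) : Bool :=
  (PySem.List.enumerate need 0).all (fun iv => !(!(decide (iv.1 ∈ c)) && (iv.2 == 1)))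

def solution (needs : List (List Int)) (r : Int) : Int :=
  let case := (PySem.List.pyGetD needs 0 []).length
  (PySem.List.combinations (PySem.List.pyRange 0 (case : Int) 1) r.toNat).foldl
    (fun answer c =>
      let count := needs.foldl (fun count need => if aRowOk c need then count + 1 else count) (0 : Int)
      max answer count)
    0

-- ===== PORT B =====
-- 'tuple(i for i, v in enumerate(need) if v == 1)'
def bOnes (need : List Int) : List Int :=
  ((PySem.List.enumerate need 0).filter (fun iv => iv.2 == 1)).map (fun iv => iv.1)

def solution_alt (needs : List (List Int)) (r : Int) : Int :=
  let case := (PySem.List.pyGetD needs 0 []).length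
  let counts := needs.foldl (fun d need =>
      let k := bOnes need
      d.insert k (d.getD k 0 + 1)) (PySem.Dict.empty : PySem.Dict (List Int) Int)
  (PySem.List.combinations (PySem.List.pyRange 0 (case : Int) 1) r.toNat).foldl
    (fun best c =>
      let cset := PySem.Set.ofList c
      let covered := counts.items.foldl (fun s p =>
          if p.1.all (fun i => PySem.Set.contains cset i) then s + p.2 else s) (0 : Int)
      max best covered)
    0

-- ===== PRECONDITION & SPEC =====
-- Pre_ excludes exactly the inputs where A raises: empty needs (IndexError on needs[0])
-- and negative r (ValueError from itertools.combinations).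
def Pre_solution (needs : List (List Int)) (r : Int) : Prop := needs ≠ [] ∧ 0 ≤ r
instance (needs : List (List Int)) (r : Int) : Decidable (Pre_solution needs r) := by unfold Pre_solution; infer_instance
def pvWitness_solution : List (List Int) × Int := ([[1, 0], [0, 1]], 1)

def Spec_solution (needs : List (List Int)) (r : Int) (out : Int) : Prop := out = solution_alt needs r
instance (needs : List (List Int)) (r : Int) (out : Int) : Decidable (Spec_solution needs r out) := by unfold Spec_solution; infer_instance

-- ===== CLAIM (what is proved, stated in full; the proofs are below) =====
def Claim_equal_solution : Prop := ∀ (needs : List (List Int)) (r : Int), Dom_solution needs r → Pre_solution needs r → Spec_solution needs r (solution needs r)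

-- ===== LEMMAS AND PROOFS =====

-- A's row test equals "every 1-position of the row lies in c"
lemma aRowOk_eq_ones_subset (c need : List Int) :
    aRowOk c need = (bOnes need).all (fun i => PySem.Set.contains (PySem.Set.ofList c) i) := by
  simp only [aRowOk, bOnes, List.all_map, List.all_filter, Function.comp_apply,
    PySem.Set.contains_eq_listContains]
  congr 1
  funext iv
  by_cases h1 : iv.1 ∈ c <;> by_cases h2 : iv.2 = 1 <;> simp [h1, h2]

lemma sum_filter_count (ms : List (List Int)) (P : List Int → Bool) :
    (((PySem.Set.ofList ms).filter P).map (fun k => (ms.count k : Int))).sum = (ms.countP P : Int) := by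
  have hperm : (PySem.Set.ofList ms).Perm ms.dedup := by
    rw [List.perm_ext_iff_of_nodup (PySem.Set.nodup_ofList ms) ms.nodup_dedup]
    intro x; simp [PySem.Set.mem_ofList, List.mem_dedup]
  rw [((hperm.filter P).map (fun k => (ms.count k : Int))).sum_eq,
    ← List.sum_map_count_dedup_filter_eq_countP P ms, Nat.cast_list_sum, List.map_map]
  simp only [Function.comp_def]
  rw [lawful_beq_subsingleton (List.instBEq) (instBEqOfDecidableEq : BEq (List Int))]

lemma per_combo (needs : List (List Int)) (c : List Int) :
    needs.foldl (fun count need => if aRowOk c need then count + 1 else count) (0 : Int)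
      = (needs.foldl (fun d need =>
            let k := bOnes need
            d.insert k (d.getD k 0 + 1)) (PySem.Dict.empty : PySem.Dict (List Int) Int)).items.foldl
          (fun s p => if p.1.all (fun i => PySem.Set.contains (PySem.Set.ofList c) i) then s + p.2 else s) (0 : Int) := by
  have hd : needs.foldl (fun d need =>
        let k := bOnes need
        d.insert k (d.getD k 0 + 1)) (PySem.Dict.empty : PySem.Dict (List Int) Int)
      = PySem.Dict.counter (needs.map bOnes) := by
    rw [← PySem.Dict.foldl_insert_getD_add_one_eq_counter]
    exact (List.foldl_map (f := bOnes) (g := fun d k => PySem.Dict.insert d k (d.getD k 0 + 1)) (l := needs) (init := PySem.Dict.empty)).symm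
  rw [PySem.List.foldl_if_add_one, hd, PySem.Dict.items_counter,
    PySem.List.foldl_if_eq_foldl_filter, PySem.List.foldl_add, List.filter_map, List.map_map]
  simp only [Function.comp_def]
  rw [sum_filter_count (needs.map bOnes) (fun k => k.all fun i => (PySem.Set.ofList c).contains i),
    List.countP_map]
  congr 2
  apply List.countP_congr
  intro need _
  rw [aRowOk_eq_ones_subset]
  rfl

-- ===== VERDICT (by name: the statement is the Claim_ definition above) =====
theorem solution_spec : Claim_equal_solution := by
  intro needs r _ _
  unfold Spec_solution solution solution_alt
  simp only []
  refine PySem.List.foldl_congr_mem _ _ _ _ ?_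
  intro acc c _
  exact congrArg (max acc) (per_combo needs c)
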